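-- pv_equiv track=rewrite | github.com/Kipngetich33/Rainfall-App | RainfallProject/rainfallapp/methods.py | assign_borders
-- ===== SOURCE A (Python) =====
-- def assign_borders(data):
--     chosen_colors = []
--     background_colors =['rgba(255, 99, 132, 0.2)',
--                 'rgba(54, 162, 235, 0.2)',
--                 'rgba(255, 206, 86, 0.2)',
--                 'rgba(75, 192, 192, 0.2)',
--                 'rgba(153, 102, 255, 0.2)',
--                 'rgba(255, 159, 64, 0.2)'
--     ]
--     for i in range(0,data):
--         position = i % 6
--         chosen_colors.append(background_colors[position])
--     return chosen_colors
-- ===== SOURCE B (Python) =====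
-- def assign_borders(data):
--     background_colors = ['rgba(255, 99, 132, 0.2)',
--                 'rgba(54, 162, 235, 0.2)',
--                 'rgba(255, 206, 86, 0.2)',
--                 'rgba(75, 192, 192, 0.2)',
--                 'rgba(153, 102, 255, 0.2)',
--                 'rgba(255, 159, 64, 0.2)'
--     ]
--     n = max(data, 0)
--     return background_colors * (n // 6) + background_colors[:n % 6]
-- ===== Notes on version B (the rewrite author's own statement) =====
-- stated objective: simpler
-- what changed: Replaces the element-by-element loop with per-index modulo by whole-list repetition plus a prefix slice (n//6 full copies then the first n%6 colors), clamping negative n to 0.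
import Mathlib
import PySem

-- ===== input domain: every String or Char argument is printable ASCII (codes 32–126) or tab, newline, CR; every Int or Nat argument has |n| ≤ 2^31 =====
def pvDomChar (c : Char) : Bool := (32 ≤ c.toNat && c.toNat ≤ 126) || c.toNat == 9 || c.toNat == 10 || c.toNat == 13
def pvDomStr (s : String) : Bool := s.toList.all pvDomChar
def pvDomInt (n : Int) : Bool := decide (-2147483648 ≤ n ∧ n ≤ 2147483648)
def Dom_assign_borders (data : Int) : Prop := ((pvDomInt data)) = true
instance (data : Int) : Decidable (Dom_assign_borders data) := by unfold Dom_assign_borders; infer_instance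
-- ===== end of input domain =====

-- B cycles the same six colors by list repetition and a prefix slice instead of A's per-element loop; return values proved equal for all data.

-- the six-element color list both Pythons hard-code
def pvBg : List String :=
  ["rgba(255, 99, 132, 0.2)",
   "rgba(54, 162, 235, 0.2)",
   "rgba(255, 206, 86, 0.2)",
   "rgba(75, 192, 192, 0.2)",
   "rgba(153, 102, 255, 0.2)",
   "rgba(255, 159, 64, 0.2)"]

-- ===== PORT A =====
-- loop over range(0, data), appending background_colors[i % 6] each step
-- (i % 6 is always in range 0..5, so the IndexError branch of pyGet? never fires; getD "" is that safe lookup)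
def assign_borders (data : Int) : List String :=
  (PySem.List.pyRange 0 data 1).foldl
    (fun chosen i => chosen ++ [PySem.List.pyGetD pvBg (PySem.Int.mod i 6) ""]) []

-- ===== PORT B =====
-- n = max(data, 0); background_colors * (n // 6) + background_colors[:n % 6]
def assign_borders_alt (data : Int) : List String :=
  let n := max data 0
  (List.replicate (PySem.Int.floordiv n 6).toNat pvBg).flatten
    ++ PySem.List.slice pvBg none (some (PySem.Int.mod n 6))

-- ===== PRECONDITION & SPEC =====
def Spec_assign_borders (data : Int) (out : List String) : Prop := out = assign_borders_alt data
instance (data : Int) (out : List String) : Decidable (Spec_assign_borders data out) := by unfold Spec_assign_borders; infer_instance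

-- ===== CLAIM (what is proved, stated in full; the proofs are below) =====
def Claim_equal_assign_borders : Prop := ∀ (data : Int), Dom_assign_borders data → Spec_assign_borders data (assign_borders data)

-- ===== LEMMAS AND PROOFS =====

-- A's loop up to a natural bound m equals B's "full copies ++ prefix" shape
lemma pv_loop_eq (m : Nat) :
    (PySem.List.pyRange 0 (m : Int) 1).foldl
      (fun chosen i => chosen ++ [PySem.List.pyGetD pvBg (PySem.Int.mod i 6) ""]) []
    = (List.replicate (m / 6) pvBg).flatten ++ pvBg.take (m % 6) := by
  induction m with
  | zero => simp
  | succ m ih =>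
    have hsplit : ((m + 1 : Nat) : Int) = (m : Int) + 1 := by push_cast; ring
    rw [hsplit, PySem.List.pyRange_one_succ_right (by positivity), List.foldl_append, ih]
    have hmod : PySem.Int.mod (m : Int) 6 = ((m % 6 : Nat) : Int) := by
      exact_mod_cast PySem.Int.mod_natCast m 6
    simp only [List.foldl_cons, List.foldl_nil, hmod, PySem.List.pyGetD_natCast]
    have hr : m % 6 < 6 := Nat.mod_lt _ (by omega)
    rcases Nat.lt_or_ge (m % 6) 5 with h5 | h5
    · -- no wrap: (m+1)/6 = m/6, (m+1)%6 = m%6 + 1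
      have hdiv : (m + 1) / 6 = m / 6 := by omega
      have hmod1 : (m + 1) % 6 = m % 6 + 1 := by omega
      rw [hdiv, hmod1, List.append_assoc]
      congr 1
      interval_cases h : (m % 6) <;> decide
    · -- wrap: m % 6 = 5
      have h5' : m % 6 = 5 := by omega
      have hdiv : (m + 1) / 6 = m / 6 + 1 := by omega
      have hmod1 : (m + 1) % 6 = 0 := by omega
      rw [hdiv, hmod1, h5', List.replicate_succ', List.flatten_append]
      simp [List.append_assoc]
      decide

-- ===== VERDICT (by name: the statement is the Claim_ definition above) =====
theorem assign_borders_spec : Claim_equal_assign_borders := by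
  intro data _
  show assign_borders data = assign_borders_alt data
  unfold assign_borders assign_borders_alt
  rcases Int.lt_or_le 0 data with h | h
  case inr =>
    rw [PySem.List.pyRange_one_eq_nil h, max_eq_right h]
    decide
  case inl =>
    have hmax : max data 0 = data := max_eq_left h.le
    obtain ⟨m, rfl⟩ : ∃ m : Nat, data = (m : Int) := ⟨data.toNat, (Int.toNat_of_nonneg h.le).symm⟩
    rw [pv_loop_eq m]
    have hdiv : PySem.Int.floordiv (max (m : Int) 0) 6 = ((m / 6 : Nat) : Int) := by
      rw [hmax]; exact_mod_cast PySem.Int.floordiv_natCast m 6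
    have hmod : PySem.Int.mod (max (m : Int) 0) 6 = ((m % 6 : Nat) : Int) := by
      rw [hmax]; exact_mod_cast PySem.Int.mod_natCast m 6
    show _ = (List.replicate (PySem.Int.floordiv (max (↑m:Int) 0) 6).toNat pvBg).flatten ++ PySem.List.slice pvBg none (some (PySem.Int.mod (max (↑m:Int) 0) 6))
    rw [hdiv, hmod, PySem.List.slice_to, Int.toNat_natCast, Int.toNat_natCast]
    positivity
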